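-- pv_equiv track=rewrite | github.com/poppy47/Webdev | rough.py | prefixConnected
-- ===== SOURCE A (Python) =====
-- def prefixConnected(words, k):
--     prefixSet = set()
--     count = 0
--     for i in range(len(words)):
--         if len(words[i]) >= k :
--             prefix = words[i][0:k+1]
--             for j in range(i+1, len(words)) :
--                 if prefix in words[j] and prefix not in prefixSet:
--                     count += 1
--                     prefixSet.add(prefix)
--     return count
-- ===== SOURCE B (Python) =====
-- def prefixConnected(words, k):
--     pending = set()   # prefixes of earlier words, not yet matched in a later word
--     counted = set()   # prefixes already matched
--     for w in words:
--         found = {p for p in pending if p in w}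
--         pending -= found
--         counted |= found
--         if len(w) >= k:
--             p = w[0:k+1]
--             if p not in counted:
--                 pending.add(p)
--     return len(counted)
-- ===== Notes on version B (the rewrite author's own statement) =====
-- stated objective: alternative
-- what changed: Replaces A's prefix-major nested scan (for each word's prefix, scan all later words) by a word-major online algorithm: one forward pass over the words that first matches the current word against the set of still-pending earlier prefixes (moving matches into a counted set) and then registers the current word's prefix as pending, returning len(counted); prefixes are counted at their match word, not at their origin word.
import Mathlib
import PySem

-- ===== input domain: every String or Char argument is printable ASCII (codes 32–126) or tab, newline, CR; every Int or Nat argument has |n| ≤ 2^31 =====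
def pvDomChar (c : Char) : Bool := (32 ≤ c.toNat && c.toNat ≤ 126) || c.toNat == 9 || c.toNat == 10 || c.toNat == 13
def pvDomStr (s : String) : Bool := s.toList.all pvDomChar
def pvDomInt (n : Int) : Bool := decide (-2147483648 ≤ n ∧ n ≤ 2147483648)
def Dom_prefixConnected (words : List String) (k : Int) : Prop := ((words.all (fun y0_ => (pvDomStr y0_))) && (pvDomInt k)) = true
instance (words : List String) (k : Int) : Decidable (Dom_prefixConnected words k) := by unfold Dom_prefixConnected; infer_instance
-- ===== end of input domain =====

-- B is a word-major online pass: each word is first matched against the pending earlier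
-- prefixes (matches move to a counted set), then contributes its own prefix as pending;
-- the answer is len(counted) (objective: alternative algorithm, same cost).

-- ===== PORT A =====
-- outer 'for i in range(len(words))' as structural recursion over the suffixes of words
-- (words[i] is the head, words[i+1:] is the tail); inner j-loop is a foldl over that tail.
def prefixConnectedGo (k : Int) : List String → PySem.Set String → Int → PySem.Set String × Int
  | [], prefixSet, count => (prefixSet, count)
  | w :: rest, prefixSet, count =>
      if k ≤ PySem.Str.len w then
        let pfx := PySem.Str.slice w (some 0) (some (k + 1))
        let sc := rest.foldl
          (fun (sc : PySem.Set String × Int) wj =>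
            if PySem.Str.isIn pfx wj && !(sc.1.contains pfx) then (sc.1.add pfx, sc.2 + 1) else sc)
          (prefixSet, count)
        prefixConnectedGo k rest sc.1 sc.2
      else
        prefixConnectedGo k rest prefixSet count

def prefixConnected (words : List String) (k : Int) : Int :=
  (prefixConnectedGo k words PySem.Set.empty 0).2

-- ===== PORT B =====
-- one iteration of Source B's 'for w in words' body on the state (pending, counted)
def pvStepB (k : Int) (st : PySem.Set String × PySem.Set String) (w : String) :
    PySem.Set String × PySem.Set String :=
  let found := PySem.Set.ofList (st.1.filter (fun p => PySem.Str.isIn p w))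
  let pending' := PySem.Set.diff st.1 found
  let counted' := PySem.Set.union st.2 found
  if k ≤ PySem.Str.len w then
    let p := PySem.Str.slice w (some 0) (some (k + 1))
    if !(PySem.Set.contains counted' p) then (PySem.Set.add pending' p, counted')
    else (pending', counted')
  else (pending', counted')

def prefixConnected_alt (words : List String) (k : Int) : Int :=
  let st := words.foldl (pvStepB k) (PySem.Set.empty, PySem.Set.empty)
  PySem.Set.len st.2

-- ===== PRECONDITION & SPEC =====
def Spec_prefixConnected (words : List String) (k : Int) (out : Int) : Prop := out = prefixConnected_alt words k
instance (words : List String) (k : Int) (out : Int) : Decidable (Spec_prefixConnected words k out) := by unfold Spec_prefixConnected; infer_instance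

-- ===== CLAIM (what is proved, stated in full; the proofs are below) =====
def Claim_equal_prefixConnected : Prop := ∀ (words : List String) (k : Int), Dom_prefixConnected words k → Spec_prefixConnected words k (prefixConnected words k)

-- ===== LEMMAS AND PROOFS =====

-- the prefix words[i][0:k+1], shared by the proof-side recursions
def pvPfx (k : Int) (w : String) : String := PySem.Str.slice w (some 0) (some (k + 1))

-- A's loop with the inner j-scan collapsed to its net effect
def cntA (k : Int) : List String → PySem.Set String → Int
  | [], _ => 0
  | w :: rest, S =>
      if k ≤ PySem.Str.len w then
        if !S.contains (pvPfx k w) && rest.any (fun wj => PySem.Str.isIn (pvPfx k w) wj) then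
          1 + cntA k rest (S.add (pvPfx k w))
        else cntA k rest S
      else cntA k rest S

-- like cntA, but the prefix is marked seen even when no later word contains it
def cntB (k : Int) : List String → PySem.Set String → Int
  | [], _ => 0
  | w :: rest, S =>
      if k ≤ PySem.Str.len w then
        (if !S.contains (pvPfx k w) && rest.any (fun wj => PySem.Str.isIn (pvPfx k w) wj) then (1 : Int) else 0)
          + cntB k rest (S.add (pvPfx k w))
      else cntB k rest S

theorem contains_add_eq (S : PySem.Set String) (p x : String) :
    (S.add p).contains x = (S.contains x || x == p) := by
  rw [Bool.eq_iff_iff]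
  simp [PySem.Set.mem_add]

-- ---- A-side: collapse the inner loop ----

theorem innerA_of_contains (p : String) (rest : List String) (S : PySem.Set String) (c : Int)
    (h : S.contains p = true) :
    rest.foldl (fun (sc : PySem.Set String × Int) wj =>
        if PySem.Str.isIn p wj && !(sc.1.contains p) then (sc.1.add p, sc.2 + 1) else sc) (S, c)
      = (S, c) := by
  induction rest with
  | nil => rfl
  | cons w rest ih =>
    simp only [List.foldl_cons, h, Bool.not_true, Bool.and_false, Bool.false_eq_true, if_false]
    exact ih

theorem innerA_eq (p : String) (rest : List String) (S : PySem.Set String) (c : Int) :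
    rest.foldl (fun (sc : PySem.Set String × Int) wj =>
        if PySem.Str.isIn p wj && !(sc.1.contains p) then (sc.1.add p, sc.2 + 1) else sc) (S, c)
      = if !S.contains p && rest.any (fun wj => PySem.Str.isIn p wj) then (S.add p, c + 1) else (S, c) := by
  induction rest generalizing S c with
  | nil => simp
  | cons w rest ih =>
    by_cases hS : S.contains p = true
    · simp only [List.foldl_cons, hS, Bool.not_true, Bool.and_false, Bool.false_and, Bool.false_eq_true, if_false]
      exact innerA_of_contains p rest S c hS
    · simp only [Bool.not_eq_true] at hS
      by_cases hw : PySem.Str.isIn p w = true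
      · have hadd : (S.add p).contains p = true := by
          rw [contains_add_eq]
          simp
        simp only [List.foldl_cons, hS, hw, Bool.not_false, Bool.and_true,
          List.any_cons, Bool.true_or, if_true]
        exact innerA_of_contains p rest (S.add p) (c + 1) hadd
      · simp only [Bool.not_eq_true] at hw
        simp only [List.foldl_cons, hw, hS, Bool.false_and, Bool.not_false, List.any_cons,
          Bool.false_or, Bool.true_and, Bool.false_eq_true, if_false]
        rw [ih]
        simp only [hS, Bool.not_false, Bool.true_and]

theorem goA_eq_cntA (k : Int) (l : List String) (S : PySem.Set String) (c : Int) :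
    (prefixConnectedGo k l S c).2 = c + cntA k l S := by
  induction l generalizing S c with
  | nil => simp [prefixConnectedGo, cntA]
  | cons w rest ih =>
    by_cases hq : k ≤ PySem.Str.len w
    · by_cases hc : (!S.contains (pvPfx k w)
          && rest.any (fun wj => PySem.Str.isIn (pvPfx k w) wj)) = true
      · simp only [pvPfx] at hc
        simp only [prefixConnectedGo, cntA, pvPfx, if_pos hq, innerA_eq, hc, if_true]
        rw [ih]
        ring
      · simp only [Bool.not_eq_true, pvPfx] at hc
        simp only [prefixConnectedGo, cntA, pvPfx, if_pos hq, innerA_eq, hc, Bool.false_eq_true, if_false]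
        exact ih S c
    · simp only [prefixConnectedGo, cntA, if_neg hq]
      exact ih S c

-- ---- middle: A's count equals the add-always variant under an invariant ----

theorem cntA_eq_cntB (k : Int) (l : List String) (SA SB : PySem.Set String)
    (hsub : ∀ x, SA.contains x = true → SB.contains x = true)
    (hdiff : ∀ x, SB.contains x = true → SA.contains x = false →
        l.any (fun wj => PySem.Str.isIn x wj) = false) :
    cntA k l SA = cntB k l SB := by
  induction l generalizing SA SB with
  | nil => rfl
  | cons w rest ih =>
    have hdiff' : ∀ x, SB.contains x = true → SA.contains x = false →
        rest.any (fun wj => PySem.Str.isIn x wj) = false := by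
      intro x h1 h2
      have h3 := hdiff x h1 h2
      simp only [List.any_cons, Bool.or_eq_false_iff] at h3
      exact h3.2
    have hinv : ∀ x, (SA.contains x = true → (SB.add (pvPfx k w)).contains x = true) := by
      intro x hx
      rw [contains_add_eq, hsub x hx, Bool.true_or]
    by_cases hq : k ≤ PySem.Str.len w
    · by_cases hA : SA.contains (pvPfx k w) = true
      · -- already seen by A, hence by B: neither counts, A keeps SA, B re-adds (no-op for contains)
        have hB : SB.contains (pvPfx k w) = true := hsub _ hA
        simp only [cntA, cntB, if_pos hq, hA, hB, Bool.not_true, Bool.false_and, Bool.false_eq_true, if_false,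
          zero_add]
        exact ih SA (SB.add (pvPfx k w)) hinv
          (fun x h1 h2 => by
            rw [contains_add_eq] at h1
            rcases Bool.or_eq_true_iff.mp h1 with h1 | h1
            · exact hdiff' x h1 h2
            · have hxp : x = pvPfx k w := by simpa using h1
              rw [hxp] at h2
              rw [hA] at h2
              cases h2)
      · simp only [Bool.not_eq_true] at hA
        by_cases hB : SB.contains (pvPfx k w) = true
        · -- seen by B only: invariant says no word of w::rest contains it, so A does not count either
          have hany := hdiff _ hB hA
          simp only [List.any_cons, Bool.or_eq_false_iff] at hany
          simp only [cntA, cntB, if_pos hq, hA, hB, hany.2, Bool.and_false, Bool.not_true,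
            Bool.false_eq_true, if_false, zero_add]
          exact ih SA (SB.add (pvPfx k w)) hinv
            (fun x h1 h2 => by
              rw [contains_add_eq] at h1
              rcases Bool.or_eq_true_iff.mp h1 with h1 | h1
              · exact hdiff' x h1 h2
              · have hxp : x = pvPfx k w := by simpa using h1
                rw [hxp]
                exact hdiff' _ hB (hxp ▸ h2))
        · simp only [Bool.not_eq_true] at hB
          by_cases hany : rest.any (fun wj => PySem.Str.isIn (pvPfx k w) wj) = true
          · -- fresh and found later: both count 1 and both mark it seen
            simp only [cntA, cntB, if_pos hq, hA, hB, hany, Bool.not_false, Bool.true_and,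
              if_true]
            rw [ih (SA.add (pvPfx k w)) (SB.add (pvPfx k w))
              (fun x hx => by
                rw [contains_add_eq] at hx ⊢
                rcases Bool.or_eq_true_iff.mp hx with hx | hx
                · rw [hsub x hx, Bool.true_or]
                · rw [hx, Bool.or_true])
              (fun x h1 h2 => by
                rw [contains_add_eq] at h1 h2
                simp only [Bool.or_eq_false_iff] at h2
                rcases Bool.or_eq_true_iff.mp h1 with h1 | h1
                · exact hdiff' x h1 h2.1
                · rw [h1] at h2
                  cases h2.2)]
          · -- fresh but never found later: neither counts; B marks it seen, harmlessly
            simp only [Bool.not_eq_true] at hany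
            simp only [cntA, cntB, if_pos hq, hA, hB, hany, Bool.and_false, Bool.false_eq_true, if_false, zero_add]
            exact ih SA (SB.add (pvPfx k w)) hinv
              (fun x h1 h2 => by
                rw [contains_add_eq] at h1
                rcases Bool.or_eq_true_iff.mp h1 with h1 | h1
                · exact hdiff' x h1 h2
                · have hxp : x = pvPfx k w := by simpa using h1
                  rw [hxp]
                  exact hany)
    · simp only [cntA, cntB, if_neg hq]
      exact ih SA SB hsub hdiff'

-- ---- B-side: |counted| of the online pass equals cntB ----

-- partition of a filter count by a first test
theorem lenFilterOr (l : List String) (a b : String → Bool) :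
    (l.filter (fun x => a x || b x)).length
      = (l.filter a).length + ((l.filter (fun x => !a x)).filter b).length := by
  induction l with
  | nil => rfl
  | cons x l ih =>
    by_cases ha : a x = true
    · simp [ha, ih]; omega
    · simp only [Bool.not_eq_true] at ha
      by_cases hb : b x = true
      · simp [ha, hb, ih]
        omega
      · simp only [Bool.not_eq_true] at hb
        simp [ha, hb, ih]

theorem bFold_len (k : Int) (l : List String) (pending counted S : PySem.Set String)
    (hpn : pending.Nodup) (hcn : counted.Nodup)
    (hdisj : ∀ p ∈ pending, p ∉ counted)
    (hS : ∀ x, S.contains x = true ↔ x ∈ pending ∨ x ∈ counted) :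
    (((l.foldl (pvStepB k) (pending, counted)).2.length : Int))
      = (counted.length : Int)
        + ((pending.filter (fun p => l.any (fun w => PySem.Str.isIn p w))).length : Int)
        + cntB k l S := by
  induction l generalizing pending counted S with
  | nil => simp [cntB]
  | cons w rest ih =>
    -- names for the state after processing w, before the prefix step
    have hfoundN : (pending.filter (fun p => PySem.Str.isIn p w)).Nodup := hpn.filter _
    have hofl : PySem.Set.ofList (pending.filter (fun p => PySem.Str.isIn p w))
        = pending.filter (fun p => PySem.Str.isIn p w) :=
      PySem.Set.ofList_eq_self_of_nodup _ hfoundN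
    have hmemf : ∀ x, x ∈ pending.filter (fun p => PySem.Str.isIn p w)
        ↔ x ∈ pending ∧ PySem.Str.isIn x w = true := by
      intro x; simp [List.mem_filter]
    have hdiffEq : PySem.Set.diff pending (pending.filter (fun p => PySem.Str.isIn p w))
        = pending.filter (fun p => !PySem.Str.isIn p w) := by
      unfold PySem.Set.diff
      apply List.filter_congr
      intro x hx
      simp [List.mem_filter, hx]
    have hfdisj : ∀ x ∈ pending.filter (fun p => PySem.Str.isIn p w), x ∉ counted := by
      intro x hx
      exact hdisj x ((hmemf x).mp hx).1
    have hunionEq : PySem.Set.union counted (pending.filter (fun p => PySem.Str.isIn p w))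
        = counted ++ pending.filter (fun p => PySem.Str.isIn p w) :=
      PySem.Set.update_eq_append_of_disjoint _ _ hfoundN hfdisj
    set found := pending.filter (fun p => PySem.Str.isIn p w) with hfound
    set pending' := pending.filter (fun p => !PySem.Str.isIn p w) with hpending'
    have hpn' : pending'.Nodup := hpn.filter _
    have hmemp' : ∀ x, x ∈ pending' ↔ x ∈ pending ∧ ¬ PySem.Str.isIn x w = true := by
      intro x; simp [hpending', List.mem_filter]
    have hcn' : (counted ++ found).Nodup := hunionEq ▸ PySem.Set.nodup_union _ found hcn
    have hdisj' : ∀ p ∈ pending', p ∉ counted ++ found := by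
      intro p hp hmem
      rcases (hmemp' p).mp hp with ⟨hp1, hp2⟩
      rcases List.mem_append.mp hmem with h | h
      · exact hdisj p hp1 h
      · exact hp2 ((hmemf p).mp h).2
    have hsplit : ∀ x, (x ∈ pending' ∨ x ∈ counted ++ found) ↔ (x ∈ pending ∨ x ∈ counted) := by
      intro x
      constructor
      · rintro (h | h)
        · exact Or.inl ((hmemp' x).mp h).1
        · rcases List.mem_append.mp h with h | h
          · exact Or.inr h
          · exact Or.inl ((hmemf x).mp h).1
      · rintro (h | h)
        · by_cases hw : PySem.Str.isIn x w = true
          · exact Or.inr (List.mem_append.mpr (Or.inr ((hmemf x).mpr ⟨h, hw⟩)))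
          · exact Or.inl ((hmemp' x).mpr ⟨h, hw⟩)
        · exact Or.inr (List.mem_append.mpr (Or.inl h))
    -- the count partition: matches of w now, the rest later
    have hpart : ((pending.filter (fun p => (w :: rest).any (fun v => PySem.Str.isIn p v))).length : Int)
        = (found.length : Int)
          + ((pending'.filter (fun p => rest.any (fun v => PySem.Str.isIn p v))).length : Int) := by
      have := lenFilterOr pending (fun p => PySem.Str.isIn p w)
        (fun p => rest.any (fun v => PySem.Str.isIn p v))
      simp only [List.any_cons]
      rw [this]
      push_cast
      ring
    -- unfold one foldl step
    rw [List.foldl_cons]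
    by_cases hq : k ≤ PySem.Str.len w
    · have hstep0 : pvStepB k (pending, counted) w
          = (if !(PySem.Set.contains (counted ++ found) (pvPfx k w))
              then (PySem.Set.add pending' (pvPfx k w), counted ++ found)
              else (pending', counted ++ found)) := by
        simp only [pvStepB, if_pos hq, pvPfx]
        rw [← hfound, hofl, hdiffEq, hunionEq]
      by_cases hm : pvPfx k w ∈ counted ++ found
      · -- prefix already counted (or matched just now): pending unchanged
        have hmemc : pvPfx k w ∈ counted ++ found := hm
        have hSin : S.contains (pvPfx k w) = true :=
          (hS _).mpr ((hsplit _).mp (Or.inr hmemc))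
        have hS' : ∀ x, (S.add (pvPfx k w)).contains x = true ↔ x ∈ pending' ∨ x ∈ counted ++ found := by
          intro x
          rw [contains_add_eq, Bool.or_eq_true_iff, hsplit x]
          constructor
          · rintro (h | h)
            · exact (hS x).mp h
            · have : x = pvPfx k w := by simpa using h
              rw [this]
              exact (hsplit _).mp (Or.inr hmemc)
          · intro h
            exact Or.inl ((hS x).mpr h)
        rw [hstep0, if_neg (by simp [hm]),
          ih pending' (counted ++ found) (S.add (pvPfx k w)) hpn' hcn' hdisj' hS']
        simp only [cntB, if_pos hq, hSin, Bool.not_true, Bool.false_and, Bool.false_eq_true,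
          if_false, zero_add]
        rw [hpart]
        push_cast [List.length_append]
        ring
      · -- prefix not yet counted: it (re-)enters pending
        have hncm : pvPfx k w ∉ counted ++ found := hm
        by_cases hp : pvPfx k w ∈ pending'
        · -- already pending (and w does not contain it): add is a no-op
          have hSin : S.contains (pvPfx k w) = true :=
            (hS _).mpr ((hsplit _).mp (Or.inl hp))
          have hS' : ∀ x, (S.add (pvPfx k w)).contains x = true ↔ x ∈ pending' ∨ x ∈ counted ++ found := by
            intro x
            rw [contains_add_eq, Bool.or_eq_true_iff, hsplit x]
            constructor
            · rintro (h | h)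
              · exact (hS x).mp h
              · have : x = pvPfx k w := by simpa using h
                rw [this]
                exact (hsplit _).mp (Or.inl hp)
            · intro h
              exact Or.inl ((hS x).mpr h)
          rw [hstep0, if_pos (by simp [hm]), PySem.Set.add_of_mem hp,
            ih pending' (counted ++ found) (S.add (pvPfx k w)) hpn' hcn' hdisj' hS']
          simp only [cntB, if_pos hq, hSin, Bool.not_true, Bool.false_and, Bool.false_eq_true,
            if_false, zero_add]
          rw [hpart]
          push_cast [List.length_append]
          ring
        · -- genuinely fresh prefix
          have hSout : S.contains (pvPfx k w) = false := by
            refine Bool.eq_false_iff.mpr (fun hct => ?_)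
            rcases (hsplit _).mpr ((hS _).mp hct) with h | h
            · exact hp h
            · exact hncm h
          have hpadd : PySem.Set.add pending' (pvPfx k w) = pending' ++ [pvPfx k w] :=
            PySem.Set.add_of_not_mem hp
          have hpn'' : (pending' ++ [pvPfx k w]).Nodup := hpadd ▸ PySem.Set.nodup_add _ _ hpn'
          have hdisj'' : ∀ p ∈ pending' ++ [pvPfx k w], p ∉ counted ++ found := by
            intro p hpm
            rcases List.mem_append.mp hpm with h | h
            · exact hdisj' p h
            · have : p = pvPfx k w := by simpa using h
              rw [this]
              exact hncm
          have hS' : ∀ x, (S.add (pvPfx k w)).contains x = true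
              ↔ x ∈ pending' ++ [pvPfx k w] ∨ x ∈ counted ++ found := by
            intro x
            rw [contains_add_eq, Bool.or_eq_true_iff]
            constructor
            · rintro (h | h)
              · rcases (hsplit x).mpr ((hS x).mp h) with h2 | h2
                · exact Or.inl (List.mem_append.mpr (Or.inl h2))
                · exact Or.inr h2
              · have : x = pvPfx k w := by simpa using h
                exact Or.inl (List.mem_append.mpr (Or.inr (by simp [this])))
            · rintro (h | h)
              · rcases List.mem_append.mp h with h2 | h2
                · exact Or.inl ((hS x).mpr ((hsplit x).mp (Or.inl h2)))
                · have : x = pvPfx k w := by simpa using h2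
                  exact Or.inr (by simp [this])
              · exact Or.inl ((hS x).mpr ((hsplit x).mp (Or.inr h)))
          rw [hstep0, if_pos (by simp [hm]), hpadd,
            ih (pending' ++ [pvPfx k w]) (counted ++ found) (S.add (pvPfx k w)) hpn'' hcn' hdisj'' hS']
          simp only [cntB, if_pos hq, hSout, Bool.not_false, Bool.true_and]
          rw [hpart]
          have hfl : ((pending' ++ [pvPfx k w]).filter
              (fun p => rest.any (fun v => PySem.Str.isIn p v))).length
              = (pending'.filter (fun p => rest.any (fun v => PySem.Str.isIn p v))).length
                + (if rest.any (fun v => PySem.Str.isIn (pvPfx k w) v) = true then 1 else 0) := by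
            have hsing : List.filter (fun p => rest.any fun v => PySem.Str.isIn p v) [pvPfx k w]
                = if rest.any (fun v => PySem.Str.isIn (pvPfx k w) v) = true then [pvPfx k w] else [] := by
              by_cases ha2 : rest.any (fun v => PySem.Str.isIn (pvPfx k w) v) = true
              · rw [if_pos ha2]
                rw [List.filter_cons_of_pos (p := fun p => rest.any fun v => PySem.Str.isIn p v) ha2]
                rfl
              · rw [if_neg ha2]
                rw [List.filter_cons_of_neg (p := fun p => rest.any fun v => PySem.Str.isIn p v) (by simpa using ha2)]
                rfl
            rw [List.filter_append, hsing, List.length_append]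
            by_cases ha2 : rest.any (fun v => PySem.Str.isIn (pvPfx k w) v) = true
            · rw [if_pos ha2, if_pos ha2]
              rfl
            · rw [if_neg ha2, if_neg ha2]
              rfl
          rw [hfl]
          by_cases ha : rest.any (fun v => PySem.Str.isIn (pvPfx k w) v) = true
          · simp only [ha, if_true]
            push_cast [List.length_append]
            ring
          · simp only [Bool.not_eq_true] at ha
            simp only [ha, Bool.false_eq_true, if_false]
            push_cast [List.length_append]
            ring
    · -- word shorter than k: only the matching phase happens
      have hstep0 : pvStepB k (pending, counted) w = (pending', counted ++ found) := by
        simp only [pvStepB, if_neg hq]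
        rw [← hfound, hofl, hdiffEq, hunionEq]
      rw [hstep0,
        ih pending' (counted ++ found) S hpn' hcn' hdisj'
          (fun x => (hS x).trans (hsplit x).symm)]
      simp only [cntB, if_neg hq]
      rw [hpart]
      push_cast [List.length_append]
      ring

-- ===== VERDICT (by name: the statement is the Claim_ definition above) =====
theorem prefixConnected_spec : Claim_equal_prefixConnected := by
  intro words k _
  unfold Spec_prefixConnected
  have hA : prefixConnected words k = cntA k words PySem.Set.empty := by
    rw [prefixConnected, goA_eq_cntA]
    ring
  have hAB : cntA k words PySem.Set.empty = cntB k words PySem.Set.empty := by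
    apply cntA_eq_cntB
    · intro x hx
      exact hx
    · intro x hx
      simp [PySem.Set.empty, PySem.Set.contains] at hx
  have hB : prefixConnected_alt words k = cntB k words PySem.Set.empty := by
    show PySem.Set.len (words.foldl (pvStepB k) (PySem.Set.empty, PySem.Set.empty)).2
        = cntB k words PySem.Set.empty
    have := bFold_len k words PySem.Set.empty PySem.Set.empty PySem.Set.empty
      List.nodup_nil List.nodup_nil (by simp [PySem.Set.empty])
      (fun x => by simp [PySem.Set.empty, PySem.Set.contains])
    simpa [PySem.Set.len, PySem.Set.empty] using this
  rw [hA, hAB, hB]
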